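-- pv_equiv track=rewrite | github.com/GeburtstagsTorte/Homework | Homework Solution/Samuel/Euler Project/Euler18.py | get_triangle_value
-- ===== SOURCE A (Python) =====
-- def get_triangle_value(m, pos):
--     # gets the sum of every number which is possible to reach when you choose pos
--     count = m[pos[0]][pos[1]]
--     a = pos[1]+1
--     for i in range(pos[0]+1, len(m)):
--         a += 1
--         for j in m[i][pos[1]:a]:
--             count += j
--     return count
-- ===== SOURCE B (Python) =====
-- def get_triangle_value(m, pos):
--     # gets the sum of every number which is possible to reach when you choose pos
--     # per-row prefix sums: each row's slice is answered as a difference of two prefix values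
--     p1, p2 = pos
--     prefix = []
--     for row in m:
--         acc = [0]
--         for x in row:
--             acc.append(acc[-1] + x)
--         prefix.append(acc)
--     total = m[p1][p2]
--     for i in range(p1 + 1, len(m)):
--         lo, hi, _ = slice(p2, p2 + 1 + (i - p1)).indices(len(m[i]))
--         if hi < lo:
--             hi = lo
--         total += prefix[i][hi] - prefix[i][lo]
--     return total
-- ===== Notes on version B (the rewrite author's own statement) =====
-- stated objective: alternative
-- what changed: B precomputes per-row prefix sums and answers each row's slice in O(1) as a difference of two prefix values (resolving the slice bounds with slice.indices), instead of A's element-by-element summation of each widening row slice.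
import Mathlib
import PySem

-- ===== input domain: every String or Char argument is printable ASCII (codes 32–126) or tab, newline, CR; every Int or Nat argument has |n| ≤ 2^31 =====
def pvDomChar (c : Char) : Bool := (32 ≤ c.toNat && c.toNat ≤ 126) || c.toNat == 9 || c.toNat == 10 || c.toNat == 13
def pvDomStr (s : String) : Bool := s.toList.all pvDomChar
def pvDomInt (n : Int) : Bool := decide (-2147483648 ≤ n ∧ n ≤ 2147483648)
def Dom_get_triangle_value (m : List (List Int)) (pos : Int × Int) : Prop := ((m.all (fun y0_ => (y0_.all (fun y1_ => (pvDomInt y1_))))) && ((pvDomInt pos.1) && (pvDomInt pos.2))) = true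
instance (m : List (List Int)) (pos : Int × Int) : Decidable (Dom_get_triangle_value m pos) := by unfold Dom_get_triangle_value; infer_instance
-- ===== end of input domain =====

-- B answers each row's slice via per-row prefix sums (O(1) per row) instead of A's element-by-element slice summation; equal return value wherever A returns.

-- ===== PORT A =====
-- A: count = m[pos[0]][pos[1]]; a = pos[1]+1; for i in range(pos[0]+1, len(m)): a += 1; for j in m[i][pos[1]:a]: count += j
-- (m[pos[0]] and m[pos[0]][pos[1]] are total lookups with a default; Pre_ guarantees both indices are valid
--  Python indices, and every i of the loop is then a valid Python index into m as well)
def get_triangle_value (m : List (List Int)) (pos : Int × Int) : Int :=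
  let count : Int := PySem.List.pyGetD (PySem.List.pyGetD m pos.1 []) pos.2 0
  let a : Int := pos.2 + 1
  let st :=
    (PySem.List.pyRange (pos.1 + 1) (m.length : Int) 1).foldl
      (fun (st : Int × Int) i =>
        ((PySem.List.slice (PySem.List.pyGetD m i []) (some pos.2) (some (st.2 + 1))).foldl
            (fun c j => c + j) st.1,
         st.2 + 1))
      (count, a)
  st.1

-- ===== PORT B =====
-- Source B: per-row prefix sums; acc[-1] is pyGetD acc (-1) 0; Python's slice(p2, b).indices(L) with step 1
-- resolves the two bounds exactly as PySem.List.clampIdx L does; m[p1][p2], m[i] and prefix[i] are total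
-- lookups with a default, in range under Pre_
def get_triangle_value_alt (m : List (List Int)) (pos : Int × Int) : Int :=
  let p1 := pos.1
  let p2 := pos.2
  let pfx := m.foldl
    (fun (pfx : List (List Int)) row =>
      pfx ++ [row.foldl (fun (acc : List Int) x => acc ++ [PySem.List.pyGetD acc (-1) 0 + x]) [0]])
    []
  let total : Int := PySem.List.pyGetD (PySem.List.pyGetD m p1 []) p2 0
  (PySem.List.pyRange (p1 + 1) (m.length : Int) 1).foldl
    (fun total i =>
      let L := (PySem.List.pyGetD m i ([] : List Int)).length
      let lo := PySem.List.clampIdx L p2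
      let hi := PySem.List.clampIdx L (p2 + 1 + (i - p1))
      let hi := if hi < lo then lo else hi
      let P := PySem.List.pyGetD pfx i ([] : List Int)
      total + (PySem.List.pyGetD P (hi : Int) 0 - PySem.List.pyGetD P (lo : Int) 0))
    total

-- ===== PRECONDITION & SPEC =====
-- Pre_ is exactly where A returns: pos[0] a valid Python index into m and pos[1] a valid Python index
-- into the selected row (otherwise A raises IndexError)
def Pre_get_triangle_value (m : List (List Int)) (pos : Int × Int) : Prop :=
  PySem.Raise.InRange m.length pos.1 ∧
  PySem.Raise.InRange (PySem.List.pyGetD m pos.1 ([] : List Int)).length pos.2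
instance (m : List (List Int)) (pos : Int × Int) : Decidable (Pre_get_triangle_value m pos) := by
  unfold Pre_get_triangle_value; infer_instance
def pvWitness_get_triangle_value : List (List Int) × (Int × Int) := ([[3], [7, 4], [2, 4, 6]], (0, 0))

def Spec_get_triangle_value (m : List (List Int)) (pos : Int × Int) (out : Int) : Prop := out = get_triangle_value_alt m pos
instance (m : List (List Int)) (pos : Int × Int) (out : Int) : Decidable (Spec_get_triangle_value m pos out) := by unfold Spec_get_triangle_value; infer_instance

-- ===== CLAIM (what is proved, stated in full; the proofs are below) =====
def Claim_equal_get_triangle_value : Prop := ∀ (m : List (List Int)) (pos : Int × Int), Dom_get_triangle_value m pos → Pre_get_triangle_value m pos → Spec_get_triangle_value m pos (get_triangle_value m pos)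

-- ===== LEMMAS AND PROOFS =====

-- a defaulted Python lookup does not depend on the default when the index is in range
theorem pyGetD_default_irrel {α : Type} (xs : List α) (i : Int) (d d' : α)
    (h : PySem.Raise.InRange xs.length i) :
    PySem.List.pyGetD xs i d = PySem.List.pyGetD xs i d' := by
  unfold PySem.List.pyGetD
  cases hv : PySem.List.pyGet? xs i with
  | none => exact absurd ((PySem.List.pyGet?_eq_none_iff xs i).mp hv) (by simpa using h)
  | some v => rfl

-- running sums of a list, starting from s (the tail of a Python prefix-sum accumulator)
def pvSums (s : Int) : List Int → List Int
  | [] => []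
  | x :: xs => (s + x) :: pvSums (s + x) xs

-- Source B's inner accumulator loop builds exactly the running sums after the start value
theorem pvSums_foldl (xs : List Int) : ∀ (acc : List Int) (h : acc ≠ []),
    xs.foldl (fun (acc : List Int) x => acc ++ [PySem.List.pyGetD acc (-1) 0 + x]) acc
      = acc ++ pvSums (acc.getLast h) xs := by
  induction xs with
  | nil => intro acc h; simp [pvSums]
  | cons x xs ih =>
    intro acc h
    rw [List.foldl_cons, PySem.List.pyGetD_neg_one acc 0 h,
        ih (acc ++ [acc.getLast h + x]) (by simp)]
    rw [List.getLast_append]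
    simp [pvSums]

theorem pvSums_getD (row : List Int) : ∀ (s : Int) (k : ℕ), k < row.length →
    (pvSums s row).getD k 0 = s + (row.take (k + 1)).sum := by
  induction row with
  | nil => intro s k hk; simp at hk
  | cons x xs ih =>
    intro s k hk
    cases k with
    | zero => simp [pvSums]
    | succ j =>
      show ((s + x) :: pvSums (s + x) xs).getD (j + 1) 0 = s + ((x :: xs).take (j + 1 + 1)).sum
      rw [List.getD_cons_succ, ih (s + x) j (by simpa using hk), List.take_succ_cons, List.sum_cons]
      ring

-- lookups into a full prefix-sum row are sums of prefixes
theorem prefix_getD (row : List Int) (k : ℕ) (hk : k ≤ row.length) :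
    ((0 : Int) :: pvSums 0 row).getD k 0 = (row.take k).sum := by
  cases k with
  | zero => simp
  | succ j => simpa using pvSums_getD row 0 j (by omega)

-- the sum of a Python slice, as a difference of prefix sums at the resolved bounds
theorem slice_sum_take (row : List Int) (a b : Int) :
    (PySem.List.slice row (some a) (some b)).sum
      = (row.take (max (PySem.List.clampIdx row.length b) (PySem.List.clampIdx row.length a))).sum
        - (row.take (PySem.List.clampIdx row.length a)).sum := by
  simp only [PySem.List.slice]
  rcases le_total (PySem.List.clampIdx row.length b) (PySem.List.clampIdx row.length a) with h | h
  · rw [Nat.sub_eq_zero_of_le h, Nat.max_eq_right h]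
    simp
  · rw [Nat.max_eq_left h]
    have htake := List.take_add (l := row) (i := PySem.List.clampIdx row.length a)
      (j := PySem.List.clampIdx row.length b - PySem.List.clampIdx row.length a)
    rw [show PySem.List.clampIdx row.length a
          + (PySem.List.clampIdx row.length b - PySem.List.clampIdx row.length a)
          = PySem.List.clampIdx row.length b from by omega] at htake
    rw [htake, List.sum_append]
    ring

-- A's outer loop, unrolled to a sum of slice-sums (the slice bound at row r is a + 1 + (r - i))
theorem loopA (m : List (List Int)) (c0 : Int) (b : Int) (i cnt a : Int) :
    ((PySem.List.pyRange i b 1).foldl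
      (fun (st : Int × Int) r =>
        ((PySem.List.slice (PySem.List.pyGetD m r []) (some c0) (some (st.2 + 1))).foldl
            (fun c j => c + j) st.1,
         st.2 + 1))
      (cnt, a)).1
    = cnt + ((PySem.List.pyRange i b 1).map
        (fun r => (PySem.List.slice (PySem.List.pyGetD m r []) (some c0) (some (a + 1 + (r - i)))).sum)).sum := by
  induction hK : (b - i).toNat generalizing i cnt a with
  | zero =>
    rw [PySem.List.pyRange_one_eq_nil (by omega)]
    simp
  | succ K ih =>
    rw [PySem.List.pyRange_one_cons (by omega)]
    simp only [List.foldl_cons, List.map_cons, List.sum_cons]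
    rw [ih (i + 1) _ (a + 1) (by omega)]
    rw [PySem.List.foldl_add _ (fun (j : Int) => j)]
    rw [List.map_id']
    have h1 : a + 1 + (i - i) = a + 1 := by ring
    rw [h1, add_assoc, add_assoc]
    congr 2
    refine congrArg List.sum (List.map_congr_left ?_)
    intro r _
    have h2 : a + (1 + 1) + (r - (i + 1)) = a + 1 + (r - i) := by ring
    rw [h2]

-- B's loop, unrolled to a sum of prefix differences
theorem loopB (m : List (List Int)) (pfx : List (List Int)) (p1 p2 : Int) (tot : Int) :
    (PySem.List.pyRange (p1 + 1) (m.length : Int) 1).foldl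
      (fun total i =>
        let L := (PySem.List.pyGetD m i ([] : List Int)).length
        let lo := PySem.List.clampIdx L p2
        let hi := PySem.List.clampIdx L (p2 + 1 + (i - p1))
        let hi := if hi < lo then lo else hi
        let P := PySem.List.pyGetD pfx i ([] : List Int)
        total + (PySem.List.pyGetD P (hi : Int) 0 - PySem.List.pyGetD P (lo : Int) 0))
      tot
    = tot + ((PySem.List.pyRange (p1 + 1) (m.length : Int) 1).map
        (fun i =>
          let L := (PySem.List.pyGetD m i ([] : List Int)).length
          let lo := PySem.List.clampIdx L p2
          let hi := PySem.List.clampIdx L (p2 + 1 + (i - p1))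
          let hi := if hi < lo then lo else hi
          let P := PySem.List.pyGetD pfx i ([] : List Int)
          PySem.List.pyGetD P (hi : Int) 0 - PySem.List.pyGetD P (lo : Int) 0)).sum := by
  rw [PySem.List.foldl_congr_mem (PySem.List.pyRange (p1 + 1) (m.length : Int) 1)
    _
    (fun total i =>
      total +
        (let L := (PySem.List.pyGetD m i ([] : List Int)).length
         let lo := PySem.List.clampIdx L p2
         let hi := PySem.List.clampIdx L (p2 + 1 + (i - p1))
         let hi := if hi < lo then lo else hi
         let P := PySem.List.pyGetD pfx i ([] : List Int)
         PySem.List.pyGetD P (hi : Int) 0 - PySem.List.pyGetD P (lo : Int) 0))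
    tot
    (fun _ _ _ => rfl)]
  rw [PySem.List.foldl_add]

-- ===== VERDICT (by name: the statement is the Claim_ definition above) =====
theorem get_triangle_value_spec : Claim_equal_get_triangle_value := by
  intro m pos _ hpre
  obtain ⟨p1, p2⟩ := pos
  obtain ⟨hp1, hp2⟩ := hpre
  unfold Spec_get_triangle_value
  simp only [get_triangle_value, get_triangle_value_alt]
  rw [loopA, loopB, PySem.List.foldl_append_singleton_eq_map, List.nil_append]
  congr 1
  refine congrArg List.sum (List.map_congr_left ?_)
  intro r hr
  obtain ⟨hr1, hr2⟩ := PySem.List.mem_pyRange_one.mp hr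
  obtain ⟨hp1a, hp1b⟩ := hp1
  have hrIn : PySem.Raise.InRange m.length r := ⟨by omega, by omega⟩
  simp only []
  have hmap : PySem.List.pyGetD
        (List.map (List.foldl (fun (acc : List Int) x => acc ++ [PySem.List.pyGetD acc (-1) 0 + x]) [0]) m)
        r ([] : List Int)
      = (0 : Int) :: pvSums 0 (PySem.List.pyGetD m r ([] : List Int)) := by
    rw [pyGetD_default_irrel _ r ([] : List Int)
          (List.foldl (fun (acc : List Int) x => acc ++ [PySem.List.pyGetD acc (-1) 0 + x]) [0] ([] : List Int))
          (by simpa using hrIn),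
        PySem.List.pyGetD_map]
    rw [pvSums_foldl _ [0] (by simp)]
    simp
  rw [hmap]
  rw [show p2 + 1 + 1 + (r - (p1 + 1)) = p2 + 1 + (r - p1) from by ring]
  rw [slice_sum_take]
  rw [PySem.List.pyGetD_natCast, PySem.List.pyGetD_natCast]
  rw [prefix_getD _ _ (by
        have h1 := PySem.List.clampIdx_le (PySem.List.pyGetD m r ([] : List Int)).length (p2 + 1 + (r - p1))
        have h2 := PySem.List.clampIdx_le (PySem.List.pyGetD m r ([] : List Int)).length p2
        split_ifs <;> omega),
      prefix_getD _ _ (PySem.List.clampIdx_le _ _)]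
  have hmm : (max (PySem.List.clampIdx (PySem.List.pyGetD m r ([] : List Int)).length (p2 + 1 + (r - p1)))
        (PySem.List.clampIdx (PySem.List.pyGetD m r ([] : List Int)).length p2))
      = (if PySem.List.clampIdx (PySem.List.pyGetD m r ([] : List Int)).length (p2 + 1 + (r - p1)) <
            PySem.List.clampIdx (PySem.List.pyGetD m r ([] : List Int)).length p2
         then PySem.List.clampIdx (PySem.List.pyGetD m r ([] : List Int)).length p2
         else PySem.List.clampIdx (PySem.List.pyGetD m r ([] : List Int)).length (p2 + 1 + (r - p1))) := by
    split_ifs <;> omega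
  rw [hmm]
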